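-- pv_equiv track=rewrite | github.com/reimarus/withourpowerscombined | tests/test_gui.py | _first_free
-- ===== SOURCE A (Python) =====
-- def _first_free(slots: list[dict], n_armies: int) -> int:
--     """Replicate _first_free_spawn logic."""
--     occupied: set[int] = set()
--     for si, slot in enumerate(slots):
--         occupied.add(slot.get("start_spot", si))
--     for i in range(n_armies):
--         if i not in occupied:
--             return i
--     return -1
-- ===== SOURCE B (Python) =====
-- def _first_free(slots: list[dict], n_armies: int) -> int:
--     """Sorted-mex walk: one ordered pass over the occupied starts instead of repeated membership tests."""
--     occupied = {slot.get("start_spot", si) for si, slot in enumerate(slots)}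
--     cand = 0
--     for v in sorted(occupied):
--         if v < cand:
--             continue
--         if v == cand:
--             cand += 1
--         else:
--             break
--     return cand if cand < n_armies else -1
-- ===== Notes on version B (the rewrite author's own statement) =====
-- stated objective: alternative
-- what changed: Replaces the scan over range(n_armies) with repeated set-membership tests by a single ordered pass: sort the occupied starts and walk them with a candidate counter (mex walk), then apply the n_armies bound.
import Mathlib
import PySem

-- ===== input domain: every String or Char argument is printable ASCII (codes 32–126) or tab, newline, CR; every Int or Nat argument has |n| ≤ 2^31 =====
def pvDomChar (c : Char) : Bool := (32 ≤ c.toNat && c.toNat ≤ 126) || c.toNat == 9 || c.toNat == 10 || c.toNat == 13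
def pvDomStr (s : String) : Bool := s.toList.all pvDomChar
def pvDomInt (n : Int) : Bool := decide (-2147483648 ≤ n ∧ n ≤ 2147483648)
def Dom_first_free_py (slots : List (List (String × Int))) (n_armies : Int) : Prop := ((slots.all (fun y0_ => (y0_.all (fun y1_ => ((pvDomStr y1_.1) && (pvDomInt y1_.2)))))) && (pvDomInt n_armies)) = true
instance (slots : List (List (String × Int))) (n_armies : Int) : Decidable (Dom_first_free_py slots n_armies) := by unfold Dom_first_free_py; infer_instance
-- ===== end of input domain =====

-- B replaces A's membership scan over range(n_armies) with one ordered mex walk over sorted(occupied); same result, similar cost.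

-- ===== PORT A =====
-- slot.get("start_spot", si)
def pvStartSpot (p : Int × List (String × Int)) : Int :=
  (PySem.Dict.mk p.2).getD "start_spot" p.1

-- 'for i in range(n_armies): if i not in occupied: return i' / 'return -1'  (range iterated lazily, as in Python)
def pvScanA (occ : PySem.Set Int) (i n : Int) : Int :=
  if _h : i < n then
    if occ.contains i then pvScanA occ (i + 1) n else i
  else -1
termination_by (n - i).toNat
decreasing_by omega

def first_free_py (slots : List (List (String × Int))) (n_armies : Int) : Int :=
  let occupied : PySem.Set Int :=
    (PySem.List.enumerate slots 0).foldl (fun s p => PySem.Set.add s (pvStartSpot p)) PySem.Set.empty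
  pvScanA occupied 0 n_armies

-- ===== PORT B =====
-- candidate walk over the sorted occupied values
def pvWalk : List Int → Int → Int
  | [], c => c
  | v :: t, c => if v < c then pvWalk t c else if v = c then pvWalk t (c + 1) else c

def first_free_py_alt (slots : List (List (String × Int))) (n_armies : Int) : Int :=
  let occupied : PySem.Set Int :=
    PySem.Set.ofList ((PySem.List.enumerate slots 0).map pvStartSpot)
  let cand := pvWalk (PySem.List.sorted occupied (fun x => x) false) 0
  if cand < n_armies then cand else -1

-- ===== PRECONDITION & SPEC =====
def Spec_first_free_py (slots : List (List (String × Int))) (n_armies : Int) (out : Int) : Prop := out = first_free_py_alt slots n_armies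
instance (slots : List (List (String × Int))) (n_armies : Int) (out : Int) : Decidable (Spec_first_free_py slots n_armies out) := by unfold Spec_first_free_py; infer_instance

-- ===== CLAIM (what is proved, stated in full; the proofs are below) =====
def Claim_equal_first_free_py : Prop := ∀ (slots : List (List (String × Int))) (n_armies : Int), Dom_first_free_py slots n_armies → Spec_first_free_py slots n_armies (first_free_py slots n_armies)

-- ===== LEMMAS AND PROOFS =====

-- the walk over a strictly increasing list computes the least value ≥ c not in the list
theorem pvWalk_spec (l : List Int) (c : Int) (h : l.Pairwise (· < ·)) :
    c ≤ pvWalk l c ∧ pvWalk l c ∉ l ∧ ∀ m : Int, c ≤ m → m < pvWalk l c → m ∈ l := by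
  induction l generalizing c with
  | nil => exact ⟨le_refl c, by simp [pvWalk], fun m h1 h2 => absurd (lt_of_le_of_lt h1 h2) (by simp [pvWalk])⟩
  | cons v t ih =>
    have hp := (List.pairwise_cons.mp h).1
    have ht := (List.pairwise_cons.mp h).2
    by_cases h1 : v < c
    · obtain ⟨hle, hnm, hall⟩ := ih c ht
      refine ⟨by simpa [pvWalk, h1] using hle, ?_, ?_⟩
      · simp only [pvWalk, if_pos h1, List.mem_cons]
        rintro (rfl | hm)
        · omega
        · exact hnm hm
      · intro m hm1 hm2
        simp only [pvWalk, if_pos h1] at hm2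
        exact List.mem_cons_of_mem _ (hall m hm1 hm2)
    · by_cases h2 : v = c
      · obtain ⟨hle, hnm, hall⟩ := ih (c + 1) ht
        refine ⟨by simp only [pvWalk, if_neg h1, if_pos h2]; omega, ?_, ?_⟩
        · simp only [pvWalk, if_neg h1, if_pos h2, List.mem_cons]
          rintro (rfl | hm)
          · omega
          · exact hnm hm
        · intro m hm1 hm2
          simp only [pvWalk, if_neg h1, if_pos h2] at hm2
          by_cases hmc : m = c
          · exact hmc ▸ h2 ▸ List.mem_cons_self
          · exact List.mem_cons_of_mem _ (hall m (by omega) hm2)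
      · refine ⟨?_, ?_, ?_⟩
        · simp [pvWalk, h1, h2]
        · simp only [pvWalk, if_neg h1, if_neg h2, List.mem_cons]
          rintro (rfl | hm)
          · exact h2 rfl
          · exact absurd (hp c hm) (by omega)
        · intro m hm1 hm2
          simp only [pvWalk, if_neg h1, if_neg h2] at hm2
          omega

-- A's scan from a up to n of the first value not in occ, characterised by the mex
theorem pvScanA_eq (occ : PySem.Set Int) (mex : Int) (n : Int)
    (hnot : occ.contains mex = false)
    (hall : ∀ m : Int, 0 ≤ m → m < mex → occ.contains m = true) :
    ∀ (k : Nat) (a : Int), (mex - a).toNat ≤ k → 0 ≤ a → a ≤ mex →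
      pvScanA occ a n = if mex < n then mex else -1 := by
  intro k
  induction k with
  | zero =>
    intro a hk ha ham
    have : a = mex := by omega
    subst this
    rw [pvScanA]
    by_cases han : a < n
    · rw [dif_pos han, if_neg (by simpa using hnot), if_pos han]
    · simp [han]
  | succ k ih =>
    intro a hk ha ham
    by_cases hcase : a = mex
    · subst hcase
      rw [pvScanA]
      by_cases han : a < n
      · rw [dif_pos han, if_neg (by simpa using hnot), if_pos han]
      · simp [han]
    · have hc : occ.contains a = true := hall a ha (by omega)
      rw [pvScanA]
      by_cases han : a < n
      · simp only [dif_pos han, hc, if_pos]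
        exact ih (a + 1) (by omega) (by omega) (by omega)
      · simp [han]; omega

theorem first_free_py_eq (slots : List (List (String × Int))) (n_armies : Int) :
    first_free_py slots n_armies = first_free_py_alt slots n_armies := by
  unfold first_free_py first_free_py_alt
  rw [PySem.Set.ofList_eq_foldl, List.foldl_map]
  set occ : PySem.Set Int :=
    (PySem.List.enumerate slots 0).foldl (fun s p => PySem.Set.add s (pvStartSpot p)) PySem.Set.empty with hocc
  have hset : occ = PySem.Set.ofList ((PySem.List.enumerate slots 0).map pvStartSpot) := by
    rw [PySem.Set.ofList_eq_foldl, List.foldl_map]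
    rfl
  set l := PySem.List.sorted occ (fun x : Int => x) false with hl
  have hpw : l.Pairwise (· < ·) := by
    rw [hl, hset]; exact PySem.List.sorted_ofList_pairwise_lt _
  have hmem : ∀ m : Int, m ∈ l ↔ m ∈ occ := fun m => PySem.List.mem_sorted occ (fun x : Int => x) false m
  obtain ⟨hle, hnm, hall⟩ := pvWalk_spec l 0 hpw
  set mex := pvWalk l 0 with hmex
  have hnot : occ.contains mex = false := by
    simp only [PySem.Set.contains, List.contains_eq_mem, decide_eq_false_iff_not]
    exact fun h => hnm ((hmem mex).mpr h)
  have hallc : ∀ m : Int, 0 ≤ m → m < mex → occ.contains m = true := by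
    intro m h1 h2
    simp only [PySem.Set.contains, List.contains_eq_mem, decide_eq_true_eq]
    exact (hmem m).mp (hall m h1 h2)
  exact pvScanA_eq occ mex n_armies hnot hallc (mex - 0).toNat 0 (le_refl _) (le_refl 0) hle

-- ===== VERDICT (by name: the statement is the Claim_ definition above) =====
theorem first_free_py_spec : Claim_equal_first_free_py := by
  intro slots n_armies _
  exact first_free_py_eq slots n_armies
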